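-- pv_equiv track=rewrite | github.com/Runarok/GeeksForGeeks-solutions | Difficulty: Medium/Path of greater than equal to k length/path-of-greater-than-equal-to-k-length.py | pathMoreThanK
-- ===== SOURCE A (Python) =====
-- from collections import defaultdict, deque
--
-- def pathMoreThanK(V, E, K, A):
--     # Create a graph using an adjacency list
--     graph = defaultdict(list)
--     for i in range(0, len(A), 3):
--         u, v, weight = A[i], A[i+1], A[i+2]
--         graph[u].append((weight, v))
--         graph[v].append((weight, u))
--
--     # BFS Initialization
--     # visited will track visited nodes in the current path's traversal
--     queue = deque([(0, 0, set())])  # (current node, cumulative path sum, visited nodes)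
--
--     while queue:
--         node, path_sum, visited = queue.popleft()
--
--         # If the path sum is greater than or equal to K, return 1
--         if path_sum >= K:
--             return 1
--
--         # Explore neighbors and track visited nodes for the current path
--         visited.add(node)
--
--         for weight, neighbor in graph[node]:
--             # Only consider unvisited neighbors for this path
--             if neighbor not in visited:
--                 # Create a new visited set for the next path
--                 queue.append((neighbor, path_sum + weight, visited.copy()))
--
--     # If no path satisfies the condition, return 0
--     return 0
-- ===== SOURCE B (Python) =====
-- from collections import defaultdict
--
-- def pathMoreThanK(V, E, K, A):
--     # Same adjacency build as before; traversal replaced by recursive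
--     # backtracking DFS with one shared visited set (no per-path copies).
--     graph = defaultdict(list)
--     for i in range(0, len(A), 3):
--         u, v, weight = A[i], A[i+1], A[i+2]
--         graph[u].append((weight, v))
--         graph[v].append((weight, u))
--
--     def dfs(node, path_sum, visited):
--         if path_sum >= K:
--             return True
--         visited.add(node)
--         found = any(
--             neighbor not in visited and dfs(neighbor, path_sum + weight, visited)
--             for weight, neighbor in graph[node]
--         )
--         visited.remove(node)
--         return found
--
--     return 1 if dfs(0, 0, set()) else 0
-- ===== Notes on version B (the rewrite author's own statement) =====
-- stated objective: alternative
-- what changed: Replaced the BFS over a deque of (node, path_sum, copied-visited-set) triples by a recursive backtracking DFS with a single shared visited set; the adjacency build is unchanged. Pre_ excludes lists whose length is not a multiple of 3, on which A raises IndexError while unpacking a triple.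
import Mathlib
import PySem

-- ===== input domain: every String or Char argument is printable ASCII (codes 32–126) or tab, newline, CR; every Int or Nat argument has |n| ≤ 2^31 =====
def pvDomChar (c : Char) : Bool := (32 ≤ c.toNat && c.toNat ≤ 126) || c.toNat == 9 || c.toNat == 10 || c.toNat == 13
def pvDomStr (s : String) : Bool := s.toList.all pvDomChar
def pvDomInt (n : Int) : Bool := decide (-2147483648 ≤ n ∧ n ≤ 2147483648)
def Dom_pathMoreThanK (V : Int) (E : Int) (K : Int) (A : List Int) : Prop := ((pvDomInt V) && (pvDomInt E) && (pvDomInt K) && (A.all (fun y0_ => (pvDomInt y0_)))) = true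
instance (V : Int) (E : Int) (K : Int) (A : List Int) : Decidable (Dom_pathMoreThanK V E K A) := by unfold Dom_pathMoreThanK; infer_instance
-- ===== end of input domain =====

-- B replaces A's BFS queue of (node, sum, copied-visited-set) triples by a recursive
-- backtracking DFS with a single visited set (objective: alternative decomposition).

-- ===== PORT A =====
-- adjacency build, shared verbatim by A and B (the Python lines are identical in Source A and Source B):
-- defaultdict(list); graph[u].append((w,v)) = Dict.modify u [] (· ++ [(w,v)]).
-- pyGet? … .getD 0 is the total form of A[i]; Pre_ below keeps every index in range.
def pvBuildGraph (A : List Int) : PySem.Dict Int (List (Int × Int)) :=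
  (PySem.List.pyRange 0 A.length 3).foldl (fun g i =>
    let u := (PySem.List.pyGet? A i).getD 0
    let v := (PySem.List.pyGet? A (i+1)).getD 0
    let w := (PySem.List.pyGet? A (i+2)).getD 0
    (g.modify u [] (· ++ [(w, v)])).modify v [] (· ++ [(w, u)]))
    PySem.Dict.empty

-- the BFS while-loop; a deque element is (node, path_sum, visited).
-- graph[node] on a defaultdict is read as getD node [] (the [] it silently inserts is
-- never observable afterwards).  Fuel only makes the recursion total: pvFuel is proved
-- sufficient below, the 0-fuel branch is never reached on any input.
def pvBfsLoop (K : Int) (g : PySem.Dict Int (List (Int × Int))) :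
    Nat → List (Int × Int × PySem.Set Int) → Int
  | _, [] => 0
  | 0, _ :: _ => 0
  | f+1, (node, s, vis) :: rest =>
      if s ≥ K then 1
      else
        let vis' := PySem.Set.add vis node
        let children := (g.getD node []).filterMap
          (fun p => if PySem.Set.contains vis' p.2 then none else some (p.2, s + p.1, vis'))
        pvBfsLoop K g f (rest ++ children)

def pvFuel (A : List Int) : Nat := (A.length + 2) ^ (A.length + 2)

def pathMoreThanK (V : Int) (E : Int) (K : Int) (A : List Int) : Int :=
  pvBfsLoop K (pvBuildGraph A) (pvFuel A) [(0, 0, PySem.Set.empty)]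

-- ===== PORT B =====
-- recursive dfs(node, path_sum, visited); Source B's shared visited set is add-ed on entry and
-- remove-d on every exit, so each call leaves visited as it found it: passing the set by
-- value is exact.  Fuel = recursion depth bound |A|+2, proved never reached.
def pvDfs (K : Int) (g : PySem.Dict Int (List (Int × Int))) :
    Nat → Int → Int → PySem.Set Int → Bool
  | 0, _, _, _ => false
  | f+1, node, s, vis =>
      if s ≥ K then true
      else
        let vis' := PySem.Set.add vis node
        (g.getD node []).any
          (fun p => !(PySem.Set.contains vis' p.2) && pvDfs K g f p.2 (s + p.1) vis')

def pathMoreThanK_alt (V : Int) (E : Int) (K : Int) (A : List Int) : Int :=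
  if pvDfs K (pvBuildGraph A) (A.length + 2) 0 0 PySem.Set.empty then 1 else 0

-- ===== PRECONDITION & SPEC =====
-- Pre_ excludes exactly the lists whose length is not a multiple of 3: there A raises
-- IndexError while unpacking u, v, weight = A[i], A[i+1], A[i+2] (and B raises identically).
def Pre_pathMoreThanK (V : Int) (E : Int) (K : Int) (A : List Int) : Prop :=
  A.length % 3 = 0
instance (V : Int) (E : Int) (K : Int) (A : List Int) : Decidable (Pre_pathMoreThanK V E K A) := by unfold Pre_pathMoreThanK; infer_instance

def pvWitness_pathMoreThanK : Int × Int × Int × List Int := (2, 1, 3, [0, 1, 5])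

def Spec_pathMoreThanK (V : Int) (E : Int) (K : Int) (A : List Int) (out : Int) : Prop := out = pathMoreThanK_alt V E K A
instance (V : Int) (E : Int) (K : Int) (A : List Int) (out : Int) : Decidable (Spec_pathMoreThanK V E K A out) := by unfold Spec_pathMoreThanK; infer_instance

-- ===== CLAIM (what is proved, stated in full; the proofs are below) =====
def Claim_equal_pathMoreThanK : Prop := ∀ (V : Int) (E : Int) (K : Int) (A : List Int), Dom_pathMoreThanK V E K A → Pre_pathMoreThanK V E K A → Spec_pathMoreThanK V E K A (pathMoreThanK V E K A)

-- ===== LEMMAS AND PROOFS =====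

-- the node set S = {0} ∪ elements of A; measure of a visited set = #(S not yet visited)
def pvNodes (A : List Int) : Finset Int := insert 0 A.toFinset

def pvM (S : Finset Int) (vis : PySem.Set Int) : Nat := (S \ vis.toFinset).card

-- pops measure for the BFS queue
def pvPops (S : Finset Int) (B : Nat) (q : List (Int × Int × PySem.Set Int)) : Nat :=
  (q.map (fun c => (B + 1) ^ (pvM S c.2.2))).sum

lemma pv_toFinset_add (vis : PySem.Set Int) (n : Int) :
    (PySem.Set.add vis n).toFinset = insert n vis.toFinset := by
  ext a
  simp [PySem.Set.mem_add, List.mem_toFinset, or_comm]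

lemma pvM_add (S : Finset Int) (vis : PySem.Set Int) (n : Int)
    (hn : n ∈ S) (h : PySem.Set.contains vis n = false) :
    pvM S (PySem.Set.add vis n) + 1 = pvM S vis := by
  have hnv : n ∉ vis := by simpa [PySem.Set.contains] using h
  have hmem : n ∈ S \ vis.toFinset := Finset.mem_sdiff.mpr ⟨hn, by simpa [List.mem_toFinset] using hnv⟩
  have hpos : 0 < (S \ vis.toFinset).card := Finset.card_pos.mpr ⟨n, hmem⟩
  unfold pvM
  rw [pv_toFinset_add, Finset.sdiff_insert, Finset.card_erase_of_mem hmem]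
  omega

lemma pv_any_congr {α : Type} (l : List α) (p q : α → Bool)
    (h : ∀ x ∈ l, p x = q x) : l.any p = l.any q := by
  induction l with
  | nil => rfl
  | cons a l ih =>
    simp only [List.any_cons, h a (List.mem_cons_self), ih (fun x hx => h x (List.mem_cons_of_mem a hx))]

lemma pv_any_filterMap {α β : Type} (l : List α) (f : α → Option β) (p : β → Bool) :
    (l.filterMap f).any p = l.any (fun a => ((f a).map p).getD false) := by
  rw [List.any_filterMap]
  apply pv_any_congr
  intro a _
  cases f a <;> simp

-- dfs is independent of the fuel as soon as the fuel exceeds the measure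
lemma pvDfs_stable (K : Int) (g : PySem.Dict Int (List (Int × Int))) (S : Finset Int)
    (hS : ∀ n p, p ∈ g.getD n [] → p.2 ∈ S) :
    ∀ d f f' (n s : Int) (vis : PySem.Set Int), pvM S vis ≤ d → n ∈ S →
      PySem.Set.contains vis n = false → pvM S vis < f → pvM S vis < f' →
      pvDfs K g f n s vis = pvDfs K g f' n s vis := by
  intro d
  induction d with
  | zero =>
    intro f f' n s vis hle hnS hnc _ _
    have := pvM_add S vis n hnS hnc
    omega
  | succ d ih =>
    intro f f' n s vis hle hnS hnc hf hf'
    have hm := pvM_add S vis n hnS hnc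
    obtain ⟨f1, rfl⟩ : ∃ k, f = k + 1 := ⟨f - 1, by omega⟩
    obtain ⟨f2, rfl⟩ : ∃ k, f' = k + 1 := ⟨f' - 1, by omega⟩
    simp only [pvDfs]
    by_cases hk : s ≥ K
    · simp [hk]
    · simp only [hk, if_false]
      apply pv_any_congr
      intro p hp
      by_cases hc : PySem.Set.contains (PySem.Set.add vis n) p.2 = true
      · simp only [hc, Bool.not_true, Bool.false_and]
      · have hc' : PySem.Set.contains (PySem.Set.add vis n) p.2 = false := by
          simpa using hc
        simp only [hc', Bool.not_false, Bool.true_and]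
        exact ih f1 f2 p.2 (s + p.1) (PySem.Set.add vis n) (by omega) (hS n p hp) hc'
          (by omega) (by omega)

-- the BFS loop returns 1 iff some queued configuration succeeds as a dfs root
lemma pvBfs_eq (K : Int) (g : PySem.Dict Int (List (Int × Int))) (S : Finset Int) (B : Nat)
    (hS : ∀ n p, p ∈ g.getD n [] → p.2 ∈ S)
    (hB : ∀ n, (g.getD n []).length ≤ B) :
    ∀ (f : Nat) (q : List (Int × Int × PySem.Set Int)),
      (∀ c ∈ q, c.1 ∈ S ∧ PySem.Set.contains c.2.2 c.1 = false) →
      pvPops S B q < f →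
      pvBfsLoop K g f q =
        (if q.any (fun c => pvDfs K g (pvM S c.2.2 + 1) c.1 c.2.1 c.2.2) then 1 else 0) := by
  intro f
  induction f with
  | zero => intro q hq hp; omega
  | succ f ih =>
    intro q hq hp
    match q with
    | [] => simp [pvBfsLoop]
    | (n, s, vis) :: rest =>
      obtain ⟨hnS, hnc⟩ := hq _ List.mem_cons_self
      have hm := pvM_add S vis n hnS hnc
      simp only [pvBfsLoop]
      by_cases hk : s ≥ K
      · rw [if_pos hk]
        have hd : pvDfs K g (pvM S vis + 1) n s vis = true := by
          simp [pvDfs, hk]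
        simp [List.any_cons, hd]
      · rw [if_neg hk]
        have hqinv : ∀ c ∈ rest ++ (g.getD n []).filterMap
            (fun p => if PySem.Set.contains (PySem.Set.add vis n) p.2 then none
                      else some (p.2, s + p.1, PySem.Set.add vis n)),
            c.1 ∈ S ∧ PySem.Set.contains c.2.2 c.1 = false := by
          intro c hc
          rcases List.mem_append.mp hc with h | h
          · exact hq c (List.mem_cons_of_mem _ h)
          · obtain ⟨p, hpmem, hpeq⟩ := List.mem_filterMap.mp h
            by_cases hcp : PySem.Set.contains (PySem.Set.add vis n) p.2 = true
            · rw [if_pos hcp] at hpeq; simp at hpeq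
            · have hcp' : PySem.Set.contains (PySem.Set.add vis n) p.2 = false := by simpa using hcp
              rw [if_neg hcp] at hpeq
              obtain rfl := Option.some.inj hpeq
              exact ⟨hS n p hpmem, hcp'⟩
        have hconst : ∀ c ∈ (g.getD n []).filterMap
            (fun p => if PySem.Set.contains (PySem.Set.add vis n) p.2 then none
                      else some (p.2, s + p.1, PySem.Set.add vis n)),
            c.2.2 = PySem.Set.add vis n := by
          intro c hc
          obtain ⟨p, hpmem, hpeq⟩ := List.mem_filterMap.mp hc
          by_cases hcp : PySem.Set.contains (PySem.Set.add vis n) p.2 = true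
          · rw [if_pos hcp] at hpeq; simp at hpeq
          · rw [if_neg hcp] at hpeq
            obtain rfl := Option.some.inj hpeq
            rfl
        have hpops : pvPops S B (rest ++ (g.getD n []).filterMap
            (fun p => if PySem.Set.contains (PySem.Set.add vis n) p.2 then none
                      else some (p.2, s + p.1, PySem.Set.add vis n))) < f := by
          have hsplit : ∀ q1 q2 : List (Int × Int × PySem.Set Int),
              pvPops S B (q1 ++ q2) = pvPops S B q1 + pvPops S B q2 := by
            intro q1 q2; simp [pvPops]
          have hchle : pvPops S B ((g.getD n []).filterMap
              (fun p => if PySem.Set.contains (PySem.Set.add vis n) p.2 then none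
                        else some (p.2, s + p.1, PySem.Set.add vis n)))
              ≤ B * (B + 1) ^ (pvM S (PySem.Set.add vis n)) := by
            set ch := (g.getD n []).filterMap
              (fun p => if PySem.Set.contains (PySem.Set.add vis n) p.2 then none
                        else some (p.2, s + p.1, PySem.Set.add vis n)) with hchdef
            have hlen : ch.length ≤ B := le_trans (List.length_filterMap_le _ _) (hB n)
            have hsum : pvPops S B ch ≤ ch.length * (B + 1) ^ (pvM S (PySem.Set.add vis n)) := by
              unfold pvPops
              calc (ch.map (fun c => (B + 1) ^ pvM S c.2.2)).sum
                  ≤ (ch.map (fun c => (B + 1) ^ pvM S c.2.2)).length •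
                      ((B + 1) ^ (pvM S (PySem.Set.add vis n))) := by
                    apply List.sum_le_card_nsmul
                    intro x hx
                    obtain ⟨c, hc, rfl⟩ := List.mem_map.mp hx
                    rw [hconst c hc]
                _ = ch.length * (B + 1) ^ (pvM S (PySem.Set.add vis n)) := by
                    simp [smul_eq_mul]
            calc pvPops S B ch ≤ ch.length * (B + 1) ^ (pvM S (PySem.Set.add vis n)) := hsum
              _ ≤ B * (B + 1) ^ (pvM S (PySem.Set.add vis n)) :=
                  Nat.mul_le_mul_right _ hlen
          have hhead : pvPops S B ((n, s, vis) :: rest) =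
              (B + 1) ^ (pvM S vis) + pvPops S B rest := by
            simp [pvPops]
          have hposw : 0 < (B + 1) ^ (pvM S (PySem.Set.add vis n)) := pow_pos (by omega) _
          have hpow : (B + 1) ^ (pvM S vis) = (B + 1) * (B + 1) ^ (pvM S (PySem.Set.add vis n)) := by
            rw [← hm]; ring
          rw [hsplit]
          have := hp
          rw [hhead] at this
          nlinarith [hchle, hposw]
        rw [ih _ hqinv hpops]
        have hhead : pvDfs K g (pvM S vis + 1) n s vis =
            ((g.getD n []).filterMap
              (fun p => if PySem.Set.contains (PySem.Set.add vis n) p.2 then none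
                        else some (p.2, s + p.1, PySem.Set.add vis n))).any
              (fun c => pvDfs K g (pvM S c.2.2 + 1) c.1 c.2.1 c.2.2) := by
          have hunfold : pvDfs K g (pvM S vis + 1) n s vis =
              (if s ≥ K then true else (g.getD n []).any
                (fun p => !(PySem.Set.contains (PySem.Set.add vis n) p.2) &&
                  pvDfs K g (pvM S vis) p.2 (s + p.1) (PySem.Set.add vis n))) := rfl
          rw [hunfold, if_neg hk, pv_any_filterMap]
          apply pv_any_congr
          intro p hp'
          by_cases hcp : PySem.Set.contains (PySem.Set.add vis n) p.2 = true
          · rw [if_pos hcp]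
            simp only [hcp, Bool.not_true, Bool.false_and, Option.map_none, Option.getD_none]
          · have hcp' : PySem.Set.contains (PySem.Set.add vis n) p.2 = false := by simpa using hcp
            rw [if_neg hcp]
            simp only [hcp', Bool.not_false, Bool.true_and, Option.map_some, Option.getD_some]
            rw [hm]
        rw [List.any_append, List.any_cons, ← hhead, Bool.or_comm]

-- characterisation of the built graph
def pvEdgePairs (A : List Int) : List (Int × Int × Int) :=
  (PySem.List.pyRange 0 A.length 3).flatMap (fun i =>
    [((PySem.List.pyGet? A i).getD 0, (PySem.List.pyGet? A (i+2)).getD 0, (PySem.List.pyGet? A (i+1)).getD 0),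
     ((PySem.List.pyGet? A (i+1)).getD 0, (PySem.List.pyGet? A (i+2)).getD 0, (PySem.List.pyGet? A i).getD 0)])

lemma pv_getD_buildGraph (A : List Int) (c : Int) :
    (pvBuildGraph A).getD c [] = ((pvEdgePairs A).filter (fun p => p.1 == c)).map (·.2) := by
  have hfold : pvBuildGraph A =
      (pvEdgePairs A).foldl (fun d p => d.modify p.1 [] (· ++ [p.2])) PySem.Dict.empty := by
    unfold pvBuildGraph pvEdgePairs
    rw [List.foldl_flatMap]
    rfl
  rw [hfold, PySem.Dict.getD_foldl_modify_append]
  simp [PySem.Dict.getD_empty]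

lemma pv_buildGraph_mem (A : List Int) (n : Int) (p : Int × Int)
    (hp : p ∈ (pvBuildGraph A).getD n []) : p.2 ∈ pvNodes A := by
  rw [pv_getD_buildGraph] at hp
  obtain ⟨q, hq, rfl⟩ := List.mem_map.mp hp
  have hq' := List.mem_filter.mp hq |>.1
  unfold pvEdgePairs at hq'
  simp only [List.mem_flatMap, List.mem_cons, List.not_mem_nil, or_false] at hq'
  obtain ⟨i, _, hcase⟩ := hq'
  have hmem : ∀ j : Int, (PySem.List.pyGet? A j).getD 0 ∈ pvNodes A := by
    intro j
    cases hg : PySem.List.pyGet? A j with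
    | none => simp [pvNodes]
    | some x =>
      have hx : x ∈ A := by
        simp only [PySem.List.pyGet?, PySem.List.pyIdx?] at hg
        split at hg <;>
          (obtain ⟨a, -, hga⟩ := Option.bind_eq_some_iff.mp hg
           exact List.mem_of_getElem? hga)
      simp [pvNodes, List.mem_toFinset, hx]
  rcases hcase with rfl | rfl
  · exact hmem _
  · exact hmem _

lemma pv_buildGraph_len (A : List Int) (h : A.length % 3 = 0) (n : Int) :
    ((pvBuildGraph A).getD n []).length ≤ A.length := by
  rw [pv_getD_buildGraph, List.length_map]
  calc (List.filter (fun p => p.1 == n) (pvEdgePairs A)).length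
      ≤ (pvEdgePairs A).length := List.length_filter_le _ _
    _ ≤ A.length := by
        unfold pvEdgePairs
        rw [List.length_flatMap]
        have hlen : ∀ l : List Int,
            (l.map (fun i => ([((PySem.List.pyGet? A i).getD 0, (PySem.List.pyGet? A (i+2)).getD 0, (PySem.List.pyGet? A (i+1)).getD 0),
              ((PySem.List.pyGet? A (i+1)).getD 0, (PySem.List.pyGet? A (i+2)).getD 0, (PySem.List.pyGet? A i).getD 0)] : List (Int × Int × Int)).length)).sum
              = 2 * l.length := by
          intro l
          induction l with
          | nil => simp
          | cons a l ih => simp [ih]; ring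
        rw [hlen]
        have hr : (PySem.List.pyRange 0 (A.length) 3).length ≤ (A.length + 2) / 3 := by
          rw [PySem.List.pyRange_of_pos 0 (A.length) (by omega)]
          simp only [List.length_map, List.length_range]
          split
          · have h30 : ((A.length : Int) - 0 + 3 - 1) / 3 = ((A.length : Int) + 2) / 3 := by ring_nf
            omega
          · omega
        omega

lemma pv_card_nodes (A : List Int) : (pvNodes A).card ≤ A.length + 1 := by
  unfold pvNodes
  calc (insert 0 A.toFinset).card ≤ A.toFinset.card + 1 := Finset.card_insert_le _ _
    _ ≤ A.length + 1 := by have := A.toFinset_card_le; omega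

-- ===== VERDICT (by name: the statement is the Claim_ definition above) =====
theorem pathMoreThanK_spec : Claim_equal_pathMoreThanK := by
  intro V E K A _ hpre
  unfold Spec_pathMoreThanK pathMoreThanK pathMoreThanK_alt
  have hS := fun n p hp => pv_buildGraph_mem A n p hp
  have hB := pv_buildGraph_len A hpre
  have hcard := pv_card_nodes A
  have h0 : (0 : Int) ∈ pvNodes A := Finset.mem_insert_self 0 _
  have hc0 : PySem.Set.contains (PySem.Set.empty : PySem.Set Int) (0 : Int) = false := rfl
  have hm0 : pvM (pvNodes A) (PySem.Set.empty : PySem.Set Int) = (pvNodes A).card := by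
    simp [pvM, PySem.Set.empty]
  have hpops : pvPops (pvNodes A) A.length [((0 : Int), (0 : Int), (PySem.Set.empty : PySem.Set Int))] < pvFuel A := by
    have h1 : pvPops (pvNodes A) A.length [((0 : Int), (0 : Int), (PySem.Set.empty : PySem.Set Int))]
        = (A.length + 1) ^ (pvNodes A).card := by
      simp only [pvPops, List.map_cons, List.map_nil, List.sum_cons, List.sum_nil, Nat.add_zero]
      rw [hm0]
    rw [h1]
    unfold pvFuel
    calc (A.length + 1) ^ (pvNodes A).card
        ≤ (A.length + 2) ^ (pvNodes A).card := Nat.pow_le_pow_left (by omega) _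
      _ ≤ (A.length + 2) ^ (A.length + 1) := Nat.pow_le_pow_right (by omega) hcard
      _ < (A.length + 2) ^ (A.length + 2) := Nat.pow_lt_pow_right (by omega) (by omega)
  rw [pvBfs_eq K (pvBuildGraph A) (pvNodes A) A.length hS hB (pvFuel A) _
    (by intro c hc; rw [List.mem_singleton] at hc; subst hc; exact ⟨h0, hc0⟩) hpops]
  rw [List.any_cons, List.any_nil, Bool.or_false]
  rw [pvDfs_stable K (pvBuildGraph A) (pvNodes A) hS ((pvNodes A).card)
    (pvM (pvNodes A) PySem.Set.empty + 1) (A.length + 2) 0 0 PySem.Set.empty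
    (by omega) h0 hc0 (by omega) (by omega)]
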